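-- pv_equiv track=rewrite | github.com/Newsujin/Algorithm | 프로그래머스/3/12987. 숫자 게임/숫자 게임.py | solution
-- ===== SOURCE A (Python) =====
-- def solution(A, B):
--     A.sort(reverse=True)
--     B.sort(reverse=True)
--     answer = 0
--     for a in A:
--         if a >= B[0]:
--             continue
--         else:
--             del B[0]
--             answer += 1
--     return (answer)
-- ===== SOURCE B (Python) =====
-- def solution(A, B):
--     # Two-pointer over sorted copies: an index into sorted B replaces A's
--     # repeated `del B[0]` (and never raises when B runs out).
--     # Note: unlike A, this does not mutate A or B in place.
--     A2 = sorted(A, reverse=True)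
--     B2 = sorted(B, reverse=True)
--     i = 0
--     answer = 0
--     for a in A2:
--         if i < len(B2) and a < B2[i]:
--             i += 1
--             answer += 1
--     return answer
-- ===== Notes on version B (the rewrite author's own statement) =====
-- stated objective: faster
-- what changed: Replaces the O(n) del B[0] front-deletions (and the crash-prone unguarded B[0] access) with a moving index into the sorted copy of B, making the scan after sorting linear; B also leaves its arguments unmutated.
import Mathlib
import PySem

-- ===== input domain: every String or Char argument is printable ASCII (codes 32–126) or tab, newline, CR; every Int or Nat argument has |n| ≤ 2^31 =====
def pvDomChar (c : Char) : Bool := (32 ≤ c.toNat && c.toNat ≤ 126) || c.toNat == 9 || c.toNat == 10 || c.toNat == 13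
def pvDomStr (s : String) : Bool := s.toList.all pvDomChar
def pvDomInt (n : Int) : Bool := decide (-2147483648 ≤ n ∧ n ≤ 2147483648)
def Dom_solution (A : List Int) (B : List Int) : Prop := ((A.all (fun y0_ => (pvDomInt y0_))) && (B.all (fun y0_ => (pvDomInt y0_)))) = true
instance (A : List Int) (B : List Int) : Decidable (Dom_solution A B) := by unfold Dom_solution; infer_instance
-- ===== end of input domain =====

-- B replaces A's repeated `del B[0]` with a moving index into sorted B (faster scan after
-- sorting, in a timing run); A sorts its arguments in place — the equivalence proved
-- here is about the RETURN value only (B does not mutate its arguments).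


-- ===== PORT A =====
-- the for-loop over sorted-descending A; state = (remaining B, answer);
-- none = the IndexError Python raises at `B[0]` when B has been emptied
def solLoopA : List Int → List Int → Int → Option (List Int × Int)
  | [], B, ans => some (B, ans)
  | a :: t, B, ans =>
    match B with
    | [] => none
    | b :: rest => if a ≥ b then solLoopA t (b :: rest) ans else solLoopA t rest (ans + 1)

def solution (A : List Int) (B : List Int) : Int :=
  match solLoopA (PySem.List.sorted A (fun x => x) true) (PySem.List.sorted B (fun x => x) true) 0 with
  | some (_, ans) => ans
  | none => 0   -- unreachable under Pre_solution (Python raises IndexError)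

-- ===== PORT B =====
def altStep (B2 : List Int) (st : Nat × Int) (a : Int) : Nat × Int :=
  if st.1 < B2.length ∧ a < B2.getD st.1 0 then (st.1 + 1, st.2 + 1) else st

def solution_alt (A : List Int) (B : List Int) : Int :=
  let A2 := PySem.List.sorted A (fun x => x) true
  let B2 := PySem.List.sorted B (fun x => x) true
  (A2.foldl (altStep B2) (0, 0)).2

-- ===== PRECONDITION & SPEC =====
-- Pre_ excludes exactly the inputs on which A raises IndexError: A nonempty and the greedy
-- deletions can exhaust B before the last iteration of the loop over A (a Hall-type
-- counting condition on the sorted lists); everywhere A returns, Pre_ holds.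
def Pre_solution (A : List Int) (B : List Int) : Prop :=
  A = [] ∨ ∃ k < B.length,
    (((PySem.List.sorted A (fun x => x) true).take (A.length - 1)).filter
      (fun a => a < (PySem.List.sorted B (fun x => x) true).getD k 0)).length + k < B.length
instance (A : List Int) (B : List Int) : Decidable (Pre_solution A B) := by unfold Pre_solution; infer_instance

def pvWitness_solution : List Int × List Int := ([1], [2, 3])

def Spec_solution (A : List Int) (B : List Int) (out : Int) : Prop := out = solution_alt A B
instance (A : List Int) (B : List Int) (out : Int) : Decidable (Spec_solution A B out) := by unfold Spec_solution; infer_instance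

-- ===== CLAIM (what is proved, stated in full; the proofs are below) =====
def Claim_equal_solution : Prop := ∀ (A : List Int) (B : List Int), Dom_solution A B → Pre_solution A B → Spec_solution A B (solution A B)
-- ===== LEMMAS AND PROOFS =====

-- when A's loop returns, B's two-pointer fold over the same list computes the same answer
lemma fold_eq (l : List Int) : ∀ (B2 : List Int) (i : Nat) (ans : Int) (r : List Int × Int),
    solLoopA l (B2.drop i) ans = some r → (l.foldl (altStep B2) (i, ans)).2 = r.2 := by
  induction l with
  | nil => intro B2 i ans r h; simp [solLoopA] at h; subst h; simp
  | cons a t ih =>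
    intro B2 i ans r h
    cases hd : B2.drop i with
    | nil => rw [hd] at h; simp [solLoopA] at h
    | cons b rest =>
      rw [hd] at h
      have hi : i < B2.length := by
        by_contra hge
        have : B2.drop i = [] := List.drop_eq_nil_of_le (by omega)
        rw [this] at hd; simp at hd
      have h0 : B2[i]? = some b := by
        have h1 : (B2.drop i)[0]? = B2[i + 0]? := List.getElem?_drop ..
        rw [hd] at h1; simpa using h1.symm
      have hbE : B2[i] = b := by
        rw [List.getElem?_eq_getElem hi] at h0; exact Option.some.inj h0
      have hrest : B2.drop (i + 1) = rest := by
        have h2 : (B2.drop i).drop 1 = B2.drop (i + 1) := List.drop_drop ..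
        rw [hd] at h2; simpa using h2.symm
      simp only [solLoopA] at h
      by_cases hab : a ≥ b
      · rw [if_pos hab] at h
        rw [← hd] at h
        have := ih B2 i ans r h
        simpa [List.foldl_cons, altStep, List.getD, h0, hbE, hi, not_lt.mpr hab] using this
      · rw [if_neg hab] at h
        rw [← hrest] at h
        have := ih B2 (i + 1) (ans + 1) r h
        simpa [List.foldl_cons, altStep, List.getD, h0, hbE, hi, lt_of_not_ge hab] using this

-- if A's loop raises, then (Hall-type count) all but the last element of l contain,
-- for each k, at least |Bl| - k elements below any upper bound of Bl.drop k
lemma crash_count (l : List Int) : ∀ (Bl : List Int) (ans : Int),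
    solLoopA l Bl ans = none → ∀ k, k ≤ Bl.length → ∀ x : Int, (∀ b ∈ Bl.drop k, b ≤ x) →
    Bl.length - k ≤ ((l.take (l.length - 1)).filter (fun a => a < x)).length := by
  induction l with
  | nil => intro Bl ans h; simp [solLoopA] at h
  | cons a t ih =>
    intro Bl ans h k hk x hx
    cases hBl : Bl with
    | nil => simp
    | cons b rest =>
      subst hBl
      simp only [solLoopA] at h
      have ht : t ≠ [] := by
        intro ht; subst ht
        by_cases hab : a ≥ b <;> simp [hab, solLoopA] at h
      have htake : (a :: t).take ((a :: t).length - 1) = a :: t.take (t.length - 1) := by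
        cases t with
        | nil => exact absurd rfl ht
        | cons c u => simp
      rw [htake, List.filter_cons]
      simp only [List.length_cons] at hk ⊢
      by_cases hab : a ≥ b
      · rw [if_pos hab] at h
        have hrec := ih (b :: rest) ans h k hk x hx
        simp only [List.length_cons] at hrec
        split
        · simp only [List.length_cons]; omega
        · omega
      · rw [if_neg hab] at h
        cases k with
        | zero =>
          have hbx : b ≤ x := hx b (by simp)
          have hrx : ∀ b' ∈ rest.drop 0, b' ≤ x := by
            intro b' hb'; exact hx b' (by simp at hb' ⊢; exact Or.inr hb')
          have hrec := ih rest (ans + 1) h 0 (by omega) x hrx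
          have hax : a < x := lt_of_lt_of_le (lt_of_not_ge hab) hbx
          rw [if_pos (by simpa using hax)]
          simp only [Nat.sub_zero] at hrec ⊢
          simp only [List.length_cons]
          omega
        | succ k' =>
          have hk' : k' ≤ rest.length := by omega
          have hrx : ∀ b' ∈ rest.drop k', b' ≤ x := by
            intro b' hb'; exact hx b' (by simpa using hb')
          have hrec := ih rest (ans + 1) h k' hk' x hrx
          split
          · simp only [List.length_cons]; omega
          · omega

-- elements of sorted-descending B from position k on are bounded by the element at k
lemma sorted_drop_le (B : List Int) (k : Nat)
    (hk : k < (PySem.List.sorted B (fun x => x) true).length) :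
    ∀ b ∈ (PySem.List.sorted B (fun x => x) true).drop k,
      b ≤ (PySem.List.sorted B (fun x => x) true).getD k 0 := by
  intro b hb
  have hpd : ((PySem.List.sorted B (fun x => x) true).drop k).Pairwise (fun a b => b ≤ a) :=
    (PySem.List.sorted_pairwise_rev B (fun x => x)).sublist (List.drop_sublist k _)
  have hg : (PySem.List.sorted B (fun x => x) true).getD k 0
      = (PySem.List.sorted B (fun x => x) true)[k] := by
    rw [List.getD_eq_getElem?_getD, List.getElem?_eq_getElem hk]; rfl
  rw [List.drop_eq_getElem_cons hk] at hb hpd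
  rw [hg]
  rcases List.mem_cons.mp hb with hb | hb
  · exact le_of_eq hb
  · exact (List.pairwise_cons.mp hpd).1 b hb

-- ===== VERDICT (by name: the statement is the Claim_ definition above) =====
theorem solution_spec : Claim_equal_solution := by
  intro A B _ hpre
  unfold Spec_solution solution solution_alt
  cases h : solLoopA (PySem.List.sorted A (fun x => x) true)
      (PySem.List.sorted B (fun x => x) true) 0 with
  | some r =>
    rcases r with ⟨brem, ans⟩
    have hf := fold_eq (PySem.List.sorted A (fun x => x) true)
      (PySem.List.sorted B (fun x => x) true) 0 0 (brem, ans) (by simpa using h)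
    have hf' : (List.foldl (altStep (PySem.List.sorted B (fun x => x) true)) (0, 0)
        (PySem.List.sorted A (fun x => x) true)).2 = ans := hf
    simp [hf']
  | none =>
    exfalso
    rcases hpre with hA | ⟨k, hk, hcnt⟩
    · subst hA
      have hnil : PySem.List.sorted ([] : List Int) (fun x => x) true = [] :=
        (PySem.List.sorted_eq_nil_iff _ _ _).mpr rfl
      rw [hnil] at h; simp [solLoopA] at h
    · have hlenB : (PySem.List.sorted B (fun x => x) true).length = B.length :=
        PySem.List.length_sorted B _ _
      have hbd := sorted_drop_le B k (by omega)
      have hcc := crash_count (PySem.List.sorted A (fun x => x) true)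
        (PySem.List.sorted B (fun x => x) true) 0 h k (by omega)
        ((PySem.List.sorted B (fun x => x) true).getD k 0) hbd
      simp only [PySem.List.length_sorted] at hcc
      omega
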